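-- pv_equiv track=rewrite | github.com/pypi-data/pypi-mirror-403 | packages/crucible-mcp/crucible_mcp-0.4.0-py3-none-any.whl/crucible/cli.py | _get_recommended_skills
-- ===== SOURCE A (Python) =====
-- def _get_recommended_skills(stack: list[str]) -> list[str]:
--     """Get recommended skills based on detected stack."""
--     skills: list[str] = ["security-engineer"]  # Always recommend
--
--     stack_skills = {
--         "python": ["backend-engineer"],
--         "typescript": ["backend-engineer", "uiux-engineer"],
--         "javascript": ["backend-engineer", "uiux-engineer"],
--         "solidity": ["web3-engineer", "gas-optimizer", "protocol-architect"],
--         "rust": ["backend-engineer", "performance-engineer"],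
--         "go": ["backend-engineer", "performance-engineer"],
--     }
--
--     for tech in stack:
--         if tech in stack_skills:
--             for skill in stack_skills[tech]:
--                 if skill not in skills:
--                     skills.append(skill)
--
--     return skills
-- ===== SOURCE B (Python) =====
-- def _get_recommended_skills(stack: list[str]) -> list[str]:
--     """Get recommended skills based on detected stack."""
--     stack_skills = {
--         "python": ["backend-engineer"],
--         "typescript": ["backend-engineer", "uiux-engineer"],
--         "javascript": ["backend-engineer", "uiux-engineer"],
--         "solidity": ["web3-engineer", "gas-optimizer", "protocol-architect"],
--         "rust": ["backend-engineer", "performance-engineer"],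
--         "go": ["backend-engineer", "performance-engineer"],
--     }
--     stream = ["security-engineer"]
--     for tech in stack:
--         stream += stack_skills.get(tech, [])
--     # sort the distinct candidates by the position of their first occurrence
--     return sorted(set(stream), key=stream.index)
-- ===== Notes on version B (the rewrite author's own statement) =====
-- stated objective: alternative
-- what changed: B builds the flat candidate stream in one unconditional pass and then computes the result as sorted(set(stream), key=stream.index) - a sort of the distinct candidates by their first-occurrence position - instead of A's nested loops with an interleaved 'not in' membership check during generation.
import Mathlib
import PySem

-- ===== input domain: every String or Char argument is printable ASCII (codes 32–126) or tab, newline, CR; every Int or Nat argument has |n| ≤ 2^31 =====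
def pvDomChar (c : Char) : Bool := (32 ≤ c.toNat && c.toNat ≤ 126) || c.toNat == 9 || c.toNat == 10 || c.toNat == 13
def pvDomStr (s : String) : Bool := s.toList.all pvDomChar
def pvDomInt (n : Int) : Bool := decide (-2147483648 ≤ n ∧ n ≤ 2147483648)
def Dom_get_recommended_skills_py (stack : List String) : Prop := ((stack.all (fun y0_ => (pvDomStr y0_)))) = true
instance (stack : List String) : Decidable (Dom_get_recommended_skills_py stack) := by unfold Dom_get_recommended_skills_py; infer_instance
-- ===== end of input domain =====

-- B builds the flat candidate stream in one pass and then obtains the result as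
-- sorted(set(stream), key=stream.index) — sort-based dedup by first-occurrence index —
-- instead of A's nested loops with an interleaved membership check; objective: alternative.


-- the dict literal shared (verbatim) by both Pythons
def stackSkillsDict : PySem.Dict String (List String) :=
  PySem.Dict.ofList [
    ("python", ["backend-engineer"]),
    ("typescript", ["backend-engineer", "uiux-engineer"]),
    ("javascript", ["backend-engineer", "uiux-engineer"]),
    ("solidity", ["web3-engineer", "gas-optimizer", "protocol-architect"]),
    ("rust", ["backend-engineer", "performance-engineer"]),
    ("go", ["backend-engineer", "performance-engineer"])]

-- ===== PORT A =====
-- 'if skill not in skills: skills.append(skill)'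
def appendIfAbsent (skills : List String) (skill : String) : List String :=
  if skill ∈ skills then skills else skills ++ [skill]

def get_recommended_skills_py (stack : List String) : List String :=
  stack.foldl (fun skills tech =>
    match stackSkillsDict.get? tech with
    | some lst => lst.foldl appendIfAbsent skills
    | none => skills) ["security-engineer"]

-- ===== PORT B =====
-- 'stream += stack_skills.get(tech, [])' builds bStream; result is
-- 'sorted(set(stream), key=stream.index)'. stream.index x is PySem.List.index?;
-- it is 'some' for every element of set(stream) (all are members of the stream),
-- so '.getD 0' is exact there; the key is injective on the set (distinct
-- first-occurrence indices), so the sort does not depend on set order.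
def bStream (stack : List String) : List String :=
  stack.foldl (fun st tech => st ++ stackSkillsDict.getD tech []) ["security-engineer"]

def get_recommended_skills_py_alt (stack : List String) : List String :=
  PySem.List.sorted (PySem.Set.ofList (bStream stack))
    (fun x => (PySem.List.index? (bStream stack) x).getD 0) false

-- ===== PRECONDITION & SPEC =====
def Spec_get_recommended_skills_py (stack : List String) (out : List String) : Prop := out = get_recommended_skills_py_alt stack
instance (stack : List String) (out : List String) : Decidable (Spec_get_recommended_skills_py stack out) := by unfold Spec_get_recommended_skills_py; infer_instance

-- ===== CLAIM (what is proved, stated in full; the proofs are below) =====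
def Claim_equal_get_recommended_skills_py : Prop := ∀ (stack : List String), Dom_get_recommended_skills_py stack → Spec_get_recommended_skills_py stack (get_recommended_skills_py stack)

-- ===== LEMMAS AND PROOFS =====

-- A's append-if-absent is exactly PySem's set-add
theorem appendIfAbsent_eq_add (s : List String) (x : String) :
    appendIfAbsent s x = PySem.Set.add s x := by
  simp [appendIfAbsent, PySem.Set.add, PySem.Set.contains]

-- A's fold over the stack equals the set-add fold over the flattened candidate lists
theorem foldA_eq_fold_flat (stack : List String) (acc : List String) :
    stack.foldl (fun skills tech =>
      match stackSkillsDict.get? tech with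
      | some lst => lst.foldl appendIfAbsent skills
      | none => skills) acc
    = (stack.flatMap (fun tech => stackSkillsDict.getD tech [])).foldl PySem.Set.add acc := by
  induction stack generalizing acc with
  | nil => rfl
  | cons t ts ih =>
      simp only [List.foldl_cons, List.flatMap_cons, List.foldl_append, ih]
      have hfold : ∀ (l : List String) (a : List String),
          l.foldl appendIfAbsent a = l.foldl PySem.Set.add a := by
        intro l
        induction l with
        | nil => intro a; rfl
        | cons y ys ihy => intro a; simp [List.foldl_cons, appendIfAbsent_eq_add, ihy]
      cases h : stackSkillsDict.get? t with
      | none => simp [PySem.Dict.getD_eq_get?_getD, h]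
      | some lst => simp [PySem.Dict.getD_eq_get?_getD, h, hfold]

-- B's stream fold is the flattened candidate stream
theorem stream_eq_flat (stack : List String) (acc : List String) :
    stack.foldl (fun st tech => st ++ stackSkillsDict.getD tech []) acc
    = acc ++ stack.flatMap (fun tech => stackSkillsDict.getD tech []) := by
  induction stack generalizing acc with
  | nil => simp
  | cons t ts ih => simp [List.foldl_cons, List.flatMap_cons, ih]

-- along set(xs), the first-occurrence indices into xs are strictly increasing
theorem pairwise_index_ofList (xs : List String) :
    (PySem.Set.ofList xs).Pairwise
      (fun a b => (PySem.List.index? xs a).getD 0 < (PySem.List.index? xs b).getD 0) := by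
  induction xs using List.reverseRecOn with
  | nil => simp [PySem.Set.ofList]
  | append_singleton ys x ih =>
      rw [PySem.Set.ofList_append_singleton]
      have htrans : (PySem.Set.ofList ys).Pairwise
          (fun a b => (PySem.List.index? (ys ++ [x]) a).getD 0
                    < (PySem.List.index? (ys ++ [x]) b).getD 0) := by
        refine ih.imp_of_mem ?_
        intro a b ha hb hlt
        have ha' : a ∈ ys := (PySem.Set.mem_ofList _ _).mp ha
        have hb' : b ∈ ys := (PySem.Set.mem_ofList _ _).mp hb
        rwa [PySem.List.index?_append_of_mem _ ha', PySem.List.index?_append_of_mem _ hb']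
      by_cases hmem : x ∈ ys
      · have hadd : PySem.Set.add (PySem.Set.ofList ys) x = PySem.Set.ofList ys := by
          simp [PySem.Set.add, PySem.Set.contains, PySem.Set.mem_ofList, hmem]
        rw [hadd]; exact htrans
      · have hadd : PySem.Set.add (PySem.Set.ofList ys) x = PySem.Set.ofList ys ++ [x] := by
          simp [PySem.Set.add, PySem.Set.contains, PySem.Set.mem_ofList, hmem]
        rw [hadd, List.pairwise_append]
        refine ⟨htrans, by simp, ?_⟩
        intro a ha b hb
        have hb' : b = x := by simpa using hb
        subst hb'
        have ha' : a ∈ ys := (PySem.Set.mem_ofList _ _).mp ha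
        obtain ⟨k, hk⟩ := Option.isSome_iff_exists.mp
          ((PySem.List.index?_isSome_iff _ _).mpr ha')
        have hkb : k < ys.length := by
          obtain ⟨hlt, -, -⟩ := PySem.List.getElem_of_index?_eq_some hk
          exact hlt
        rw [PySem.List.index?_append_of_mem _ ha', hk,
            PySem.List.index?_append_singleton_self _ _ hmem]
        simpa using hkb

-- ===== VERDICT (by name: the statement is the Claim_ definition above) =====
theorem get_recommended_skills_py_spec : Claim_equal_get_recommended_skills_py := by
  intro stack _
  unfold Spec_get_recommended_skills_py get_recommended_skills_py get_recommended_skills_py_alt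
  rw [foldA_eq_fold_flat]
  have hsorted : PySem.List.sorted (PySem.Set.ofList (bStream stack))
      (fun x => (PySem.List.index? (bStream stack) x).getD 0) false
      = PySem.Set.ofList (bStream stack) := by
    apply PySem.List.sorted_eq_of_perm_of_pairwise_lt
    · exact List.Perm.refl _
    · exact pairwise_index_ofList _
  rw [hsorted]
  have hs : bStream stack
      = "security-engineer" :: stack.flatMap (fun tech => stackSkillsDict.getD tech []) := by
    unfold bStream; rw [stream_eq_flat]; rfl
  rw [hs]
  simp [PySem.Set.ofList, List.foldl_cons, PySem.Set.add, PySem.Set.contains]
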